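-- pv_equiv track=rewrite | github.com/lyrisk216/realthinkProject | RT/逢七过.py | have7
-- ===== SOURCE A (Python) =====
-- def have7(n):
--     if n % 7 == 0:
--         return True
--     while n > 0:
--         if n % 10 == 7:
--             return True
--         n //= 10
--     return False
-- ===== SOURCE B (Python) =====
-- def have7(n):
--     return n % 7 == 0 or (n > 0 and '7' in str(n))
-- ===== Notes on version B (the rewrite author's own statement) =====
-- stated objective: idiomatic
-- what changed: The explicit digit-peeling while loop (n % 10 / n //= 10) is replaced by a single boolean expression using a string membership test '7' in str(n), keeping the n > 0 guard that makes negatives skip the digit check.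
import Mathlib
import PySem

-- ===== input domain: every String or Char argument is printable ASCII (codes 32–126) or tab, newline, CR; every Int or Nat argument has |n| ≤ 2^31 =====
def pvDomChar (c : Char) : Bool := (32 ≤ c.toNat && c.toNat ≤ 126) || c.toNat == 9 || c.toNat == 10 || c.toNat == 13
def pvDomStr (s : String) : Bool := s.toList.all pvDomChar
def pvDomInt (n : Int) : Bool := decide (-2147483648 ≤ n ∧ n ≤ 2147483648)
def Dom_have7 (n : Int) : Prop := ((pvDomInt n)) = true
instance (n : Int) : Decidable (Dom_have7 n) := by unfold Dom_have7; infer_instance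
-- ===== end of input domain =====

-- B replaces A's digit-peeling while loop by the test `'7' in str(n)` (guarded by n > 0,
-- matching A's loop being skipped for non-positive n); equality of the return values is proved below.

-- ===== PORT A =====
-- the `while n > 0: if n % 10 == 7: return True; n //= 10` loop of A
def have7Loop (n : Int) : Bool :=
  if _h : 0 < n then
    if PySem.Int.mod n 10 == 7 then true
    else have7Loop (PySem.Int.floordiv n 10)
  else false
termination_by n.toNat
decreasing_by
  rw [PySem.Int.floordiv_eq_ediv_of_pos (by omega : (0:Int) < 10)]
  omega

def have7 (n : Int) : Bool :=
  if PySem.Int.mod n 7 == 0 then true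
  else have7Loop n

-- ===== PORT B =====
def have7_alt (n : Int) : Bool :=
  PySem.Int.mod n 7 == 0 || (decide (0 < n) && PySem.Str.isIn "7" (PySem.Int.toStr n))

-- ===== PRECONDITION & SPEC =====
def Spec_have7 (n : Int) (out : Bool) : Prop := out = have7_alt n
instance (n : Int) (out : Bool) : Decidable (Spec_have7 n out) := by unfold Spec_have7; infer_instance

-- ===== CLAIM (what is proved, stated in full; the proofs are below) =====
def Claim_equal_have7 : Prop := ∀ (n : Int), Dom_have7 n → Spec_have7 n (have7 n)

-- ===== LEMMAS AND PROOFS =====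

-- reference predicate: the decimal digits of m contain 7
def natHas7 (m : Nat) : Bool :=
  if m = 0 then false else (m % 10 == 7) || natHas7 (m / 10)
decreasing_by exact Nat.div_lt_self (by omega) (by omega)

theorem have7Loop_eq_natHas7 (m : Nat) : have7Loop (m : Int) = natHas7 m := by
  induction m using Nat.strong_induction_on with
  | _ m ih =>
    rw [have7Loop, natHas7]
    by_cases hm : m = 0
    · subst hm; simp
    · have hpos : (0:Int) < (m : Int) := by omega
      rw [dif_pos hpos, if_neg hm]
      have hmod : PySem.Int.mod (m : Int) 10 = ((m % 10 : Nat) : Int) := by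
        exact_mod_cast PySem.Int.mod_natCast m 10
      have hdiv : PySem.Int.floordiv (m : Int) 10 = ((m / 10 : Nat) : Int) := by
        exact_mod_cast PySem.Int.floordiv_natCast m 10
      rw [hmod, hdiv, ih (m / 10) (Nat.div_lt_self (by omega) (by omega))]
      by_cases h7 : m % 10 = 7
      · simp [h7]
      · have h2 : ¬ ((m : Int) % 10 = 7) := by omega
        simp [h2, h7]

theorem singleton_infix_iff_mem (a : Char) (l : List Char) : [a] <:+: l ↔ a ∈ l := by
  constructor
  · intro h; exact (List.singleton_sublist).1 h.sublist
  · intro h; obtain ⟨s, t, rfl⟩ := List.append_of_mem h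
    exact ⟨s, t, by simp⟩

theorem digitChar_eq_seven (d : Nat) (hd : d < 10) : (Nat.digitChar d = '7') ↔ d = 7 := by
  interval_cases d <;> simp [Nat.digitChar]

theorem mem7_toDigitsCore (fuel : Nat) : ∀ (n : Nat) (ds : List Char), n < fuel →
    ('7' ∈ Nat.toDigitsCore 10 fuel n ds ↔ natHas7 n = true ∨ '7' ∈ ds) := by
  induction fuel with
  | zero => intro n ds h; omega
  | succ fuel ih =>
    intro n ds h
    show '7' ∈ (if n / 10 = 0 then (n % 10).digitChar :: ds
                else Nat.toDigitsCore 10 fuel (n / 10) ((n % 10).digitChar :: ds)) ↔ _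
    by_cases hdiv : n / 10 = 0
    · rw [if_pos hdiv]
      by_cases hn : n = 0
      · subst hn; simp [natHas7, Nat.digitChar]
      · have hN : natHas7 n = (n % 10 == 7) := by
          rw [natHas7, if_neg hn, hdiv]; simp [natHas7]
        rw [hN]
        have hd := digitChar_eq_seven (n % 10) (by omega)
        have hd' : ('7' = (n % 10).digitChar) ↔ n % 10 = 7 :=
          ⟨fun h => hd.1 h.symm, fun h => (hd.2 h).symm⟩
        simp only [List.mem_cons, beq_iff_eq]
        rw [hd']
    · rw [if_neg hdiv]
      have hn : n ≠ 0 := by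
        intro h0; subst h0; simp at hdiv
      have hlt : n / 10 < fuel := by
        have := Nat.div_lt_self (Nat.pos_of_ne_zero hn) (by omega : 1 < 10)
        omega
      rw [ih (n / 10) ((n % 10).digitChar :: ds) hlt]
      have hN : natHas7 n = ((n % 10 == 7) || natHas7 (n / 10)) := by
        rw [natHas7, if_neg hn]
      rw [hN]
      have hd := digitChar_eq_seven (n % 10) (by omega)
      have hd' : ('7' = (n % 10).digitChar) ↔ n % 10 = 7 :=
        ⟨fun h => hd.1 h.symm, fun h => (hd.2 h).symm⟩
      simp only [List.mem_cons, Bool.or_eq_true, beq_iff_eq]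
      rw [hd']
      tauto

theorem natHas7_iff_mem_toDigits (m : Nat) :
    (natHas7 m = true) ↔ '7' ∈ Nat.toDigits 10 m := by
  rw [Nat.toDigits, mem7_toDigitsCore (m + 1) m [] (by omega)]
  simp

theorem isIn_toStr_eq (m : Nat) : PySem.Str.isIn "7" (PySem.Int.toStr (m : Int)) = natHas7 m := by
  have h1 : (PySem.Int.toStr (m : Int)).toList = Nat.toDigits 10 m := by
    rw [PySem.Int.toList_toStr, PySem.Int.toChars]
    rw [if_neg (by omega)]
    simp
  have h2 : ("7" : String).toList = ['7'] := rfl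
  rw [Bool.eq_iff_iff, PySem.Str.isIn_iff_infix, h1, h2, singleton_infix_iff_mem,
    ← natHas7_iff_mem_toDigits]

-- ===== VERDICT (by name: the statement is the Claim_ definition above) =====
theorem have7_spec : Claim_equal_have7 := by
  intro n _
  unfold Spec_have7 have7 have7_alt
  cases hb : (PySem.Int.mod n 7 == 0) with
  | true => simp
  | false =>
    simp only [Bool.false_eq_true, if_false, Bool.false_or]
    by_cases hpos : 0 < n
    · have hm : n = ((n.toNat : Nat) : Int) := by omega
      rw [hm, have7Loop_eq_natHas7, isIn_toStr_eq]
      simp [← hm, hpos]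
    · rw [have7Loop, dif_neg hpos]
      simp [hpos]
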